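-- pv_equiv track=rewrite | github.com/wintermute-0207/morning-briefing | src/morning_briefing/extractor.py | analyze_significance
-- ===== SOURCE A (Python) =====
-- def analyze_significance(content: str, title: str) -> str:
--     """Generate context-aware 'why this matters' for Alexander."""
--     content_lower = content.lower()
--     title_lower = title.lower()
--
--     # More precise matching - avoid false positives
--     significance_parts = []
--
--     # Privacy/security - check title first (stronger signal)
--     if any(w in title_lower for w in ['privacy', 'security', 'breach', 'tracking']):
--         significance_parts.append("Privacy/security trend")
--     elif any(phrase in content_lower[:2000] for phrase in ['privacy concerns', 'security vulnerability', 'data breach']):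
--         significance_parts.append("Privacy/security trend")
--
--     # AI/ML - be careful not to match words inside other words
--     ai_patterns = [' ai ', 'machine learning', 'llm ', 'language model', 'gpt-4', 'claude', 'neural network']
--     if any(p in content_lower for p in ai_patterns):
--         significance_parts.append("AI/ML development")
--
--     # Infrastructure - specific terms
--     infra_patterns = ['kubernetes', 'docker ', 'infrastructure', 'observability', 'database', 'cloud ', 'devops']
--     if any(p in content_lower for p in infra_patterns):
--         significance_parts.append("Infrastructure tooling")
--
--     # Economics/business
--     econ_patterns = ['startup', 'valuation', 'funding round', 'revenue', 'ipo ', 'market trend']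
--     if any(p in content_lower for p in econ_patterns):
--         significance_parts.append("Market signal")
--
--     # Open source
--     oss_patterns = ['open source', 'github', ' open ', 'mit license', 'gpl license']
--     if any(p in content_lower for p in oss_patterns):
--         significance_parts.append("Open source ecosystem")
--
--     # Research
--     research_patterns = ['research paper', 'study found', 'published in', 'arxiv.org']
--     if any(p in content_lower for p in research_patterns):
--         significance_parts.append("Research finding")
--
--     # Archives/preservation
--     archive_patterns = ['internet archive', 'archive.org', 'digital preservation', 'library of congress']
--     if any(p in content_lower for p in archive_patterns):
--         significance_parts.append("Knowledge preservation issue")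
--
--     # Streaming/media (for Babylon 5 type stories)
--     media_patterns = ['streaming', 'netflix', 'youtube', 'content licensing', 'media rights']
--     if any(p in content_lower for p in media_patterns):
--         significance_parts.append("Media/content landscape shift")
--
--     # Software preservation/historical software
--     preservation_patterns = ['reverse engineer', 'reverse-engineer', 'preservation', 'legacy code',
--                             '40 year old', '40-year-old', 'from 198', 'from 197', 'source code rescued',
--                             'abandoned software', 'software archaeology']
--     if any(p in title_lower or p in content_lower[:3000] for p in preservation_patterns):
--         significance_parts.append("Software preservation")
--
--     if significance_parts:
--         if len(significance_parts) == 1: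
--             base = significance_parts[0]
--         elif len(significance_parts) == 2:
--             base = f"{significance_parts[0]} intersecting with {significance_parts[1]}"
--         else:
--             base = f"{significance_parts[0]} at the intersection of {significance_parts[1]} and {significance_parts[2]}"
--
--         implications = {
--             'Privacy/security trend': '— relevant to your infrastructure decisions and user trust.',
--             'AI/ML development': '— may impact your tooling choices or the podcaster project.',
--             'Infrastructure tooling': '— directly relevant to your DevOps work.',
--             'Market signal': '— indicates where investment and talent are flowing.',
--             'Open source ecosystem': '— affects sustainability of tools you depend on.',
--             'Research finding': '— early signal of validated approaches.',
--             'Knowledge preservation issue': '— affects long-term access to information.',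
--             'Media/content landscape shift': '— signals changes in how content is distributed and consumed.',
--             'Software preservation': '— demonstrates techniques for maintaining access to legacy systems and code.',
--         }
--
--         for key, impl in implications.items():
--             if key in base:
--                 return base + ' ' + impl
--
--         return base + ' — worth tracking for implications to your work.'
--
--     return 'Interesting development in your areas of focus — monitoring for emerging patterns.'
-- ===== SOURCE B (Python) =====
-- # Pattern-major re-implementation: one flat scan over (pattern, scope, label)
-- # triples into a set of matched labels, then a canonical-order filter and a
-- # direct keyed lookup of the implication (instead of A's nine category blocks
-- # and its substring scan over the implications dict).
--
-- IMPLICATIONS = {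
--     'Privacy/security trend': '— relevant to your infrastructure decisions and user trust.',
--     'AI/ML development': '— may impact your tooling choices or the podcaster project.',
--     'Infrastructure tooling': '— directly relevant to your DevOps work.',
--     'Market signal': '— indicates where investment and talent are flowing.',
--     'Open source ecosystem': '— affects sustainability of tools you depend on.',
--     'Research finding': '— early signal of validated approaches.',
--     'Knowledge preservation issue': '— affects long-term access to information.',
--     'Media/content landscape shift': '— signals changes in how content is distributed and consumed.',
--     'Software preservation': '— demonstrates techniques for maintaining access to legacy systems and code.',
-- }
--
-- # (pattern, scope, label): scope names which text(s) the pattern is searched in.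
-- PATTERNS = (
--     [(w, 'title', 'Privacy/security trend') for w in ['privacy', 'security', 'breach', 'tracking']]
--     + [(p, 'c2000', 'Privacy/security trend') for p in ['privacy concerns', 'security vulnerability', 'data breach']]
--     + [(p, 'content', 'AI/ML development') for p in [' ai ', 'machine learning', 'llm ', 'language model', 'gpt-4', 'claude', 'neural network']]
--     + [(p, 'content', 'Infrastructure tooling') for p in ['kubernetes', 'docker ', 'infrastructure', 'observability', 'database', 'cloud ', 'devops']]
--     + [(p, 'content', 'Market signal') for p in ['startup', 'valuation', 'funding round', 'revenue', 'ipo ', 'market trend']]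
--     + [(p, 'content', 'Open source ecosystem') for p in ['open source', 'github', ' open ', 'mit license', 'gpl license']]
--     + [(p, 'content', 'Research finding') for p in ['research paper', 'study found', 'published in', 'arxiv.org']]
--     + [(p, 'content', 'Knowledge preservation issue') for p in ['internet archive', 'archive.org', 'digital preservation', 'library of congress']]
--     + [(p, 'content', 'Media/content landscape shift') for p in ['streaming', 'netflix', 'youtube', 'content licensing', 'media rights']]
--     + [(p, 'both', 'Software preservation') for p in
--        ['reverse engineer', 'reverse-engineer', 'preservation', 'legacy code',
--         '40 year old', '40-year-old', 'from 198', 'from 197', 'source code rescued',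
--         'abandoned software', 'software archaeology']]
-- )
--
--
-- def analyze_significance(content: str, title: str) -> str:
--     """Generate context-aware 'why this matters' for Alexander."""
--     content_lower = content.lower()
--     title_lower = title.lower()
--
--     texts = {
--         'title': [title_lower],
--         'content': [content_lower],
--         'c2000': [content_lower[:2000]],
--         'both': [title_lower, content_lower[:3000]],
--     }
--
--     matched = set()
--     for pattern, scope, label in PATTERNS:
--         if any(pattern in t for t in texts[scope]):
--             matched.add(label)
--
--     labels = [l for l in IMPLICATIONS if l in matched]
--     if not labels:
--         return 'Interesting development in your areas of focus — monitoring for emerging patterns.'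
--
--     if len(labels) == 1:
--         base = labels[0]
--     elif len(labels) == 2:
--         base = f"{labels[0]} intersecting with {labels[1]}"
--     else:
--         base = f"{labels[0]} at the intersection of {labels[1]} and {labels[2]}"
--     # labels[0] heads base and no label is a substring of another label or of
--     # the connector text, so A's ordered dict scan picks exactly this key.
--     return base + ' ' + IMPLICATIONS[labels[0]]
-- ===== Notes on version B (the rewrite author's own statement) =====
-- stated objective: alternative
-- what changed: B inverts the traversal: instead of A's nine sequential per-category blocks each scanning its own pattern list and then a substring scan over the implications dict to pick the description, B makes one flat pattern-major pass over (pattern, scope, label) triples collecting matched labels into a set, derives the ordered label list by filtering the canonical key order against that set, and fetches the implication by a direct keyed dict lookup on the first label.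
import Mathlib
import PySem

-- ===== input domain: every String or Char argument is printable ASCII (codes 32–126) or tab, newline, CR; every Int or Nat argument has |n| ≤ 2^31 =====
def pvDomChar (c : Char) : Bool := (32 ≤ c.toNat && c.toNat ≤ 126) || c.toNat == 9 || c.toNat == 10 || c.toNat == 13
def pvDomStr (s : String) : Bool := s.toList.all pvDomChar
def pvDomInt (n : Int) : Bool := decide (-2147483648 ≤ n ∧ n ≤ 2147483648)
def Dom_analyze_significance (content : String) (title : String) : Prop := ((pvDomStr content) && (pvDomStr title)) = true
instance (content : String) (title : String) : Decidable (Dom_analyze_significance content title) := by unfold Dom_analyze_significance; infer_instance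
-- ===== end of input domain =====

-- B replaces A's nine sequential category blocks plus the substring scan over the
-- implications dict by one flat pattern-major pass over (pattern, scope, label) triples
-- collecting matched labels into a set, then a canonical-order filter and a direct
-- keyed lookup of the implication (objective: alternative decomposition).

-- ===== PORT A =====
def pvImplsA : PySem.Dict String String := PySem.Dict.ofList
  [ ("Privacy/security trend", "— relevant to your infrastructure decisions and user trust."),
    ("AI/ML development", "— may impact your tooling choices or the podcaster project."),
    ("Infrastructure tooling", "— directly relevant to your DevOps work."),
    ("Market signal", "— indicates where investment and talent are flowing."),
    ("Open source ecosystem", "— affects sustainability of tools you depend on."),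
    ("Research finding", "— early signal of validated approaches."),
    ("Knowledge preservation issue", "— affects long-term access to information."),
    ("Media/content landscape shift", "— signals changes in how content is distributed and consumed."),
    ("Software preservation", "— demonstrates techniques for maintaining access to legacy systems and code.") ]

def pvPartsA (content_lower title_lower : String) : List String :=
  let p : List String := []
  let p := if ["privacy", "security", "breach", "tracking"].any
              (fun w => PySem.Str.isIn w title_lower) then p ++ ["Privacy/security trend"]
           else if ["privacy concerns", "security vulnerability", "data breach"].any
              (fun w => PySem.Str.isIn w (PySem.Str.slice content_lower none (some 2000))) then
             p ++ ["Privacy/security trend"]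
           else p
  let p := if [" ai ", "machine learning", "llm ", "language model", "gpt-4", "claude", "neural network"].any
              (fun w => PySem.Str.isIn w content_lower) then p ++ ["AI/ML development"] else p
  let p := if ["kubernetes", "docker ", "infrastructure", "observability", "database", "cloud ", "devops"].any
              (fun w => PySem.Str.isIn w content_lower) then p ++ ["Infrastructure tooling"] else p
  let p := if ["startup", "valuation", "funding round", "revenue", "ipo ", "market trend"].any
              (fun w => PySem.Str.isIn w content_lower) then p ++ ["Market signal"] else p
  let p := if ["open source", "github", " open ", "mit license", "gpl license"].any
              (fun w => PySem.Str.isIn w content_lower) then p ++ ["Open source ecosystem"] else p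
  let p := if ["research paper", "study found", "published in", "arxiv.org"].any
              (fun w => PySem.Str.isIn w content_lower) then p ++ ["Research finding"] else p
  let p := if ["internet archive", "archive.org", "digital preservation", "library of congress"].any
              (fun w => PySem.Str.isIn w content_lower) then p ++ ["Knowledge preservation issue"] else p
  let p := if ["streaming", "netflix", "youtube", "content licensing", "media rights"].any
              (fun w => PySem.Str.isIn w content_lower) then p ++ ["Media/content landscape shift"] else p
  let p := if ["reverse engineer", "reverse-engineer", "preservation", "legacy code",
               "40 year old", "40-year-old", "from 198", "from 197", "source code rescued",
               "abandoned software", "software archaeology"].any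
              (fun w => PySem.Str.isIn w title_lower ||
                        PySem.Str.isIn w (PySem.Str.slice content_lower none (some 3000))) then
             p ++ ["Software preservation"] else p
  p

def pvTailA (parts : List String) : String :=
  let base :=
    if parts.length == 1 then PySem.List.pyGetD parts 0 ""
    else if parts.length == 2 then
      PySem.List.pyGetD parts 0 "" ++ " intersecting with " ++ PySem.List.pyGetD parts 1 ""
    else
      PySem.List.pyGetD parts 0 "" ++ " at the intersection of " ++
        PySem.List.pyGetD parts 1 "" ++ " and " ++ PySem.List.pyGetD parts 2 ""
  match pvImplsA.items.find? (fun kv => PySem.Str.isIn kv.1 base) with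
  | some kv => base ++ " " ++ kv.2
  | none => base ++ " — worth tracking for implications to your work."

def analyze_significance (content : String) (title : String) : String :=
  if (pvPartsA (PySem.Str.lower content) (PySem.Str.lower title)).isEmpty then
    "Interesting development in your areas of focus — monitoring for emerging patterns."
  else pvTailA (pvPartsA (PySem.Str.lower content) (PySem.Str.lower title))

-- ===== PORT B =====
def pvImplsB : PySem.Dict String String := PySem.Dict.ofList
  [ ("Privacy/security trend", "— relevant to your infrastructure decisions and user trust."),
    ("AI/ML development", "— may impact your tooling choices or the podcaster project."),
    ("Infrastructure tooling", "— directly relevant to your DevOps work."),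
    ("Market signal", "— indicates where investment and talent are flowing."),
    ("Open source ecosystem", "— affects sustainability of tools you depend on."),
    ("Research finding", "— early signal of validated approaches."),
    ("Knowledge preservation issue", "— affects long-term access to information."),
    ("Media/content landscape shift", "— signals changes in how content is distributed and consumed."),
    ("Software preservation", "— demonstrates techniques for maintaining access to legacy systems and code.") ]

-- the flat (pattern, scope, label) triples (Source B's PATTERNS, written out)
def pvPatternsB : List (String × String × String) :=
  [ ("privacy", "title", "Privacy/security trend"),
    ("security", "title", "Privacy/security trend"),
    ("breach", "title", "Privacy/security trend"),
    ("tracking", "title", "Privacy/security trend"),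
    ("privacy concerns", "c2000", "Privacy/security trend"),
    ("security vulnerability", "c2000", "Privacy/security trend"),
    ("data breach", "c2000", "Privacy/security trend"),
    (" ai ", "content", "AI/ML development"),
    ("machine learning", "content", "AI/ML development"),
    ("llm ", "content", "AI/ML development"),
    ("language model", "content", "AI/ML development"),
    ("gpt-4", "content", "AI/ML development"),
    ("claude", "content", "AI/ML development"),
    ("neural network", "content", "AI/ML development"),
    ("kubernetes", "content", "Infrastructure tooling"),
    ("docker ", "content", "Infrastructure tooling"),
    ("infrastructure", "content", "Infrastructure tooling"),
    ("observability", "content", "Infrastructure tooling"),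
    ("database", "content", "Infrastructure tooling"),
    ("cloud ", "content", "Infrastructure tooling"),
    ("devops", "content", "Infrastructure tooling"),
    ("startup", "content", "Market signal"),
    ("valuation", "content", "Market signal"),
    ("funding round", "content", "Market signal"),
    ("revenue", "content", "Market signal"),
    ("ipo ", "content", "Market signal"),
    ("market trend", "content", "Market signal"),
    ("open source", "content", "Open source ecosystem"),
    ("github", "content", "Open source ecosystem"),
    (" open ", "content", "Open source ecosystem"),
    ("mit license", "content", "Open source ecosystem"),
    ("gpl license", "content", "Open source ecosystem"),
    ("research paper", "content", "Research finding"),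
    ("study found", "content", "Research finding"),
    ("published in", "content", "Research finding"),
    ("arxiv.org", "content", "Research finding"),
    ("internet archive", "content", "Knowledge preservation issue"),
    ("archive.org", "content", "Knowledge preservation issue"),
    ("digital preservation", "content", "Knowledge preservation issue"),
    ("library of congress", "content", "Knowledge preservation issue"),
    ("streaming", "content", "Media/content landscape shift"),
    ("netflix", "content", "Media/content landscape shift"),
    ("youtube", "content", "Media/content landscape shift"),
    ("content licensing", "content", "Media/content landscape shift"),
    ("media rights", "content", "Media/content landscape shift"),
    ("reverse engineer", "both", "Software preservation"),
    ("reverse-engineer", "both", "Software preservation"),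
    ("preservation", "both", "Software preservation"),
    ("legacy code", "both", "Software preservation"),
    ("40 year old", "both", "Software preservation"),
    ("40-year-old", "both", "Software preservation"),
    ("from 198", "both", "Software preservation"),
    ("from 197", "both", "Software preservation"),
    ("source code rescued", "both", "Software preservation"),
    ("abandoned software", "both", "Software preservation"),
    ("software archaeology", "both", "Software preservation") ]

-- Source B's 'texts' dict: which text(s) a scope name searches
def pvTextsB (content_lower title_lower : String) : PySem.Dict String (List String) :=
  PySem.Dict.ofList
    [ ("title", [title_lower]),
      ("content", [content_lower]),
      ("c2000", [PySem.Str.slice content_lower none (some 2000)]),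
      ("both", [title_lower, PySem.Str.slice content_lower none (some 3000)]) ]

-- the flat pass: matched = set(); for pattern, scope, label in PATTERNS: …
-- (scope lookup texts[scope] ported with getD: every scope literal is a key, so KeyError is unreachable)
def pvMatchedB (content_lower title_lower : String) : PySem.Set String :=
  pvPatternsB.foldl
    (fun s t =>
      if ((pvTextsB content_lower title_lower).getD t.2.1 []).any
           (fun txt => PySem.Str.isIn t.1 txt)
      then PySem.Set.add s t.2.2 else s)
    PySem.Set.empty

-- labels = [l for l in IMPLICATIONS if l in matched]  (canonical key order)
def pvLabelsB : List String := pvImplsB.keys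

def pvBaseB (labels : List String) : String :=
  if labels.length == 1 then PySem.List.pyGetD labels 0 ""
  else if labels.length == 2 then
    PySem.List.pyGetD labels 0 "" ++ " intersecting with " ++ PySem.List.pyGetD labels 1 ""
  else
    PySem.List.pyGetD labels 0 "" ++ " at the intersection of " ++
      PySem.List.pyGetD labels 1 "" ++ " and " ++ PySem.List.pyGetD labels 2 ""

def analyze_significance_alt (content : String) (title : String) : String :=
  let content_lower := PySem.Str.lower content
  let title_lower := PySem.Str.lower title
  let matched := pvMatchedB content_lower title_lower
  let labels := pvLabelsB.filter (fun l => PySem.Set.contains matched l)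
  if labels.isEmpty then
    "Interesting development in your areas of focus — monitoring for emerging patterns."
  else
    -- IMPLICATIONS[labels[0]] ported with getD: labels[0] is always a key
    pvBaseB labels ++ " " ++ pvImplsB.getD (PySem.List.pyGetD labels 0 "") ""

-- ===== PRECONDITION & SPEC =====
def Spec_analyze_significance (content : String) (title : String) (out : String) : Prop := out = analyze_significance_alt content title
instance (content : String) (title : String) (out : String) : Decidable (Spec_analyze_significance content title out) := by unfold Spec_analyze_significance; infer_instance

-- ===== CLAIM (what is proved, stated in full; the proofs are below) =====
def Claim_equal_analyze_significance : Prop := ∀ (content : String) (title : String), Dom_analyze_significance content title → Spec_analyze_significance content title (analyze_significance content title)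

-- ===== LEMMAS AND PROOFS =====

-- the nine (label, implication) pairs of the implications dict, in rule order
def pvRulePairs : List (String × String) :=
  [ ("Privacy/security trend", "— relevant to your infrastructure decisions and user trust."),
    ("AI/ML development", "— may impact your tooling choices or the podcaster project."),
    ("Infrastructure tooling", "— directly relevant to your DevOps work."),
    ("Market signal", "— indicates where investment and talent are flowing."),
    ("Open source ecosystem", "— affects sustainability of tools you depend on."),
    ("Research finding", "— early signal of validated approaches."),
    ("Knowledge preservation issue", "— affects long-term access to information."),
    ("Media/content landscape shift", "— signals changes in how content is distributed and consumed."),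
    ("Software preservation", "— demonstrates techniques for maintaining access to legacy systems and code.") ]

theorem pvImplsA_items : pvImplsA.items = pvRulePairs := by decide

theorem pvLabelsB_lit : pvLabelsB =
    ["Privacy/security trend", "AI/ML development", "Infrastructure tooling", "Market signal",
     "Open source ecosystem", "Research finding", "Knowledge preservation issue",
     "Media/content landscape shift", "Software preservation"] := by decide

theorem pvLabelsB_eq : pvLabelsB = pvRulePairs.map Prod.fst := by decide

theorem pvImplsB_getD : ∀ kv ∈ pvRulePairs, pvImplsB.getD kv.1 "" = kv.2 := by decide

-- membership in the flat fold = some triple with this label matched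
theorem pvContains_fold (g : String × String × String → Bool) (ts : List (String × String × String))
    (s : PySem.Set String) (L : String) :
    PySem.Set.contains
      (ts.foldl (fun s t => if g t then PySem.Set.add s t.2.2 else s) s) L
      = (PySem.Set.contains s L || ts.any (fun t => g t && (t.2.2 == L))) := by
  induction ts generalizing s with
  | nil => simp
  | cons a ts ih =>
    simp only [List.foldl_cons, List.any_cons]
    by_cases hg : g a
    · rw [if_pos hg, ih]
      have hadd : PySem.Set.contains (PySem.Set.add s a.2.2) L
          = (PySem.Set.contains s L || (a.2.2 == L)) := by
        rcases h : (PySem.Set.contains s L || (a.2.2 == L)) with _ | _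
        · simp only [Bool.or_eq_false_iff] at h
          rcases hc : PySem.Set.contains (PySem.Set.add s a.2.2) L with _ | _
          · rfl
          · rcases (PySem.Set.mem_add _ _ _).mp ((PySem.Set.contains_iff _ _).mp hc) with h1 | h1
            · rw [(PySem.Set.contains_iff _ _).mpr h1] at h; simp at h
            · rw [h1] at h; simp at h
        · rcases Bool.or_eq_true_iff.mp h with h1 | h1
          · exact (PySem.Set.contains_iff _ _).mpr
              ((PySem.Set.mem_add _ _ _).mpr (Or.inl ((PySem.Set.contains_iff _ _).mp h1)))
          · exact (PySem.Set.contains_iff _ _).mpr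
              ((PySem.Set.mem_add _ _ _).mpr (Or.inr (beq_iff_eq.mp h1).symm))
      rw [hadd, hg]
      simp [Bool.or_assoc]
    · rw [if_neg hg, ih, eq_false_of_ne_true hg]
      simp

-- List.filter as chunk concatenation
theorem pvFilterChunk {α : Type} (p : α → Bool) (a : α) (l : List α) :
    List.filter p (a :: l) = (if p a then [a] else []) ++ l.filter p := by
  by_cases h : p a <;> simp [h]

-- A's if-chain equals the concatenation of per-category chunks
theorem pvChainChunks (c1 c1' c2 c3 c4 c5 c6 c7 c8 c9 : Bool) :
    (let p : List String := []
     let p := if c1 then p ++ ["Privacy/security trend"]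
              else if c1' then p ++ ["Privacy/security trend"] else p
     let p := if c2 then p ++ ["AI/ML development"] else p
     let p := if c3 then p ++ ["Infrastructure tooling"] else p
     let p := if c4 then p ++ ["Market signal"] else p
     let p := if c5 then p ++ ["Open source ecosystem"] else p
     let p := if c6 then p ++ ["Research finding"] else p
     let p := if c7 then p ++ ["Knowledge preservation issue"] else p
     let p := if c8 then p ++ ["Media/content landscape shift"] else p
     let p := if c9 then p ++ ["Software preservation"] else p
     p) =
    ((if (c1 || c1') then ["Privacy/security trend"] else []) ++
     ((if c2 then ["AI/ML development"] else []) ++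
      ((if c3 then ["Infrastructure tooling"] else []) ++
       ((if c4 then ["Market signal"] else []) ++
        ((if c5 then ["Open source ecosystem"] else []) ++
         ((if c6 then ["Research finding"] else []) ++
          ((if c7 then ["Knowledge preservation issue"] else []) ++
           ((if c8 then ["Media/content landscape shift"] else []) ++
            ((if c9 then ["Software preservation"] else []) ++ ([] : List String)))))))))) := by
  cases c1 <;> cases c1' <;> cases c2 <;> cases c3 <;> cases c4 <;> cases c5 <;>
    cases c6 <;> cases c7 <;> cases c8 <;> cases c9 <;> rfl

-- the parts list A builds equals B's canonical-order filter of the matched set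
theorem pvParts_eq_labels (cl tl : String) :
    pvPartsA cl tl = pvLabelsB.filter (fun l => PySem.Set.contains (pvMatchedB cl tl) l) := by
  have ht : (pvTextsB cl tl).getD "title" [] = [tl] := rfl
  have hc : (pvTextsB cl tl).getD "content" [] = [cl] := rfl
  have h2k : (pvTextsB cl tl).getD "c2000" [] = [PySem.Str.slice cl none (some 2000)] := rfl
  have hb : (pvTextsB cl tl).getD "both" [] = [tl, PySem.Str.slice cl none (some 3000)] := rfl
  have hmem : ∀ L, PySem.Set.contains (pvMatchedB cl tl) L
      = pvPatternsB.any (fun t =>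
          ((pvTextsB cl tl).getD t.2.1 []).any (fun txt => PySem.Str.isIn t.1 txt) && (t.2.2 == L)) := by
    intro L
    rw [pvMatchedB, pvContains_fold]
    simp [PySem.Set.empty, PySem.Set.contains]
  have hA : pvPartsA cl tl =
      ((if (["privacy", "security", "breach", "tracking"].any
              (fun w => PySem.Str.isIn w tl) ||
            ["privacy concerns", "security vulnerability", "data breach"].any
              (fun w => PySem.Str.isIn w (PySem.Str.slice cl none (some 2000)))) then
          ["Privacy/security trend"] else []) ++
       ((if [" ai ", "machine learning", "llm ", "language model", "gpt-4", "claude", "neural network"].any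
              (fun w => PySem.Str.isIn w cl) then ["AI/ML development"] else []) ++
        ((if ["kubernetes", "docker ", "infrastructure", "observability", "database", "cloud ", "devops"].any
              (fun w => PySem.Str.isIn w cl) then ["Infrastructure tooling"] else []) ++
         ((if ["startup", "valuation", "funding round", "revenue", "ipo ", "market trend"].any
              (fun w => PySem.Str.isIn w cl) then ["Market signal"] else []) ++
          ((if ["open source", "github", " open ", "mit license", "gpl license"].any
              (fun w => PySem.Str.isIn w cl) then ["Open source ecosystem"] else []) ++
           ((if ["research paper", "study found", "published in", "arxiv.org"].any
              (fun w => PySem.Str.isIn w cl) then ["Research finding"] else []) ++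
            ((if ["internet archive", "archive.org", "digital preservation", "library of congress"].any
              (fun w => PySem.Str.isIn w cl) then ["Knowledge preservation issue"] else []) ++
             ((if ["streaming", "netflix", "youtube", "content licensing", "media rights"].any
              (fun w => PySem.Str.isIn w cl) then ["Media/content landscape shift"] else []) ++
              ((if ["reverse engineer", "reverse-engineer", "preservation", "legacy code",
                    "40 year old", "40-year-old", "from 198", "from 197", "source code rescued",
                    "abandoned software", "software archaeology"].any
                  (fun w => PySem.Str.isIn w tl ||
                            PySem.Str.isIn w (PySem.Str.slice cl none (some 3000))) then
                  ["Software preservation"] else []) ++ ([] : List String)))))))))) :=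
    pvChainChunks _ _ _ _ _ _ _ _ _ _
  rw [hA, pvLabelsB_lit]
  simp only [pvFilterChunk, List.filter_nil, hmem, pvPatternsB, List.any_cons, List.any_nil,
    ht, hc, h2k, hb]
  simp [Bool.or_assoc]

-- ---- the implications-dict scan always picks the first matched rule's pair ----

-- a length-2 infix of an append is an infix of a side or straddles the boundary
theorem pvPairInfixAppend (x y : Char) (A B : List Char) (h : [x, y] <:+: A ++ B) :
    [x, y] <:+: A ∨ [x, y] <:+: B ∨ ((∃ A', A = A' ++ [x]) ∧ (∃ B', B = y :: B')) := by
  induction A with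
  | nil => exact Or.inr (Or.inl (by simpa using h))
  | cons a A' ih =>
    rcases List.infix_cons_iff.mp h with hp | hi
    · rcases hp with ⟨t, ht⟩
      cases A' with
      | nil =>
        simp only [List.nil_append, List.cons_append] at ht
        cases ht
        exact Or.inr (Or.inr ⟨⟨[], rfl⟩, ⟨t, rfl⟩⟩)
      | cons a' A'' =>
        simp only [List.cons_append] at ht
        cases ht
        exact Or.inl ⟨[], A'', by simp⟩
    · rcases ih hi with h1 | h2 | ⟨⟨A'', hA⟩, hB⟩
      · exact Or.inl (List.infix_cons h1)
      · exact Or.inr (Or.inl h2)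
      · exact Or.inr (Or.inr ⟨⟨a :: A'', by simp [hA]⟩, hB⟩)

theorem pvNoStraddle (x y : Char) (hx : x ≠ ' ') (hy : y ≠ ' ')
    (A B : List Char) (hA : ¬ [x, y] <:+: A)
    (C : List Char) (hCh : C.head? = some ' ') (hCl : C.getLast? = some ' ')
    (hC : ¬ [x, y] <:+: C) (hB : ¬ [x, y] <:+: B) :
    ¬ [x, y] <:+: A ++ (C ++ B) := by
  intro h
  rcases pvPairInfixAppend x y A (C ++ B) h with h1 | h2 | ⟨_, ⟨B', hB'⟩⟩
  · exact hA h1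
  · rcases pvPairInfixAppend x y C B h2 with g1 | g2 | ⟨⟨C', hC'⟩, _⟩
    · exact hC g1
    · exact hB g2
    · rw [hC', List.getLast?_concat] at hCl
      injection hCl with hxx
      exact hx hxx
  · cases C with
    | nil => simp at hCh
    | cons c0 C0 =>
      simp only [List.head?_cons, Option.some.injEq] at hCh
      simp only [List.cons_append] at hB'
      injection hB' with h1 _
      exact hy (by rw [← h1, hCh])

-- each label's first two characters: its distinguishing bigram
theorem pvPair_of_len2 (w : List Char) (h : w.length = 2) : ∃ x y, w = [x, y] := by
  match w, h with | [x, y], _ => exact ⟨x, y, rfl⟩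

theorem pvWitBigram (w : List Char) (hlen : w.length = 2) (hsp : ' ' ∉ w) :
    ∃ x y, w = [x, y] ∧ x ≠ ' ' ∧ y ≠ ' ' := by
  obtain ⟨x, y, rfl⟩ := pvPair_of_len2 w hlen
  refine ⟨x, y, rfl, ?_, ?_⟩ <;> rintro rfl <;> simp at hsp

set_option maxRecDepth 20000 in
theorem pvWitFacts : ∀ kv ∈ pvRulePairs,
    (kv.1.toList.take 2) <:+: kv.1.toList ∧
    ((kv.1.toList.take 2).length = 2 ∧ ' ' ∉ kv.1.toList.take 2) ∧
    (∀ kv' ∈ pvRulePairs, kv.1 ≠ kv'.1 → ¬ (kv.1.toList.take 2) <:+: kv'.1.toList) ∧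
    ¬ (kv.1.toList.take 2) <:+: (" intersecting with ").toList ∧
    ¬ (kv.1.toList.take 2) <:+: (" at the intersection of ").toList ∧
    ¬ (kv.1.toList.take 2) <:+: (" and ").toList := by decide

theorem pvConnFacts :
    ((" intersecting with ").toList.head? = some ' ' ∧ (" intersecting with ").toList.getLast? = some ' ') ∧
    ((" at the intersection of ").toList.head? = some ' ' ∧ (" at the intersection of ").toList.getLast? = some ' ') ∧
    ((" and ").toList.head? = some ' ' ∧ (" and ").toList.getLast? = some ' ') := by decide

-- labels are pairwise distinct across a split of the rule list
theorem pvLabelsNodup : (pvRulePairs.map Prod.fst).Nodup := by decide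

theorem pvIsIn_false_of_not_infix (K base : String) (h : ¬ K.toList <:+: base.toList) :
    PySem.Str.isIn K base = false := by
  rcases hb : PySem.Str.isIn K base with _ | _
  · rfl
  · exact absurd ((PySem.Str.isIn_iff_infix _ _).mp hb) h

theorem pvIsIn_true_of_prefix (K base : String) (h : K.toList <+: base.toList) :
    PySem.Str.isIn K base = true :=
  (PySem.Str.isIn_iff_infix _ _).mpr h.isInfix

theorem pvGet0 {α : Type} (x : α) (l : List α) (d : α) : PySem.List.pyGetD (x :: l) 0 d = x := by simp [pysem]
theorem pvGet1 {α : Type} (x y : α) (l : List α) (d : α) : PySem.List.pyGetD (x :: y :: l) 1 d = y := by simp [pysem]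
theorem pvGet2 {α : Type} (x y z : α) (l : List α) (d : α) : PySem.List.pyGetD (x :: y :: z :: l) 2 d = z := by simp [pysem]

theorem pvNoIn1 (xp ap : String × String) (hx : xp ∈ pvRulePairs) (ha : ap ∈ pvRulePairs)
    (hne : xp.1 ≠ ap.1) : PySem.Str.isIn xp.1 ap.1 = false := by
  obtain ⟨hwK, _, hothers, _, _, _⟩ := pvWitFacts xp hx
  exact pvIsIn_false_of_not_infix _ _ (fun h => hothers ap ha hne (hwK.trans h))

theorem pvNoIn2 (xp ap bp : String × String) (hx : xp ∈ pvRulePairs) (ha : ap ∈ pvRulePairs)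
    (hb : bp ∈ pvRulePairs) (hna : xp.1 ≠ ap.1) (hnb : xp.1 ≠ bp.1) :
    PySem.Str.isIn xp.1 (ap.1 ++ " intersecting with " ++ bp.1) = false := by
  obtain ⟨hwK, ⟨hlen, hsp⟩, hothers, hc1, _, _⟩ := pvWitFacts xp hx
  obtain ⟨u, v, huv, hu, hv⟩ := pvWitBigram _ hlen hsp
  apply pvIsIn_false_of_not_infix
  intro h
  have hin := hwK.trans h
  rw [huv, String.toList_append, String.toList_append, List.append_assoc] at hin
  exact pvNoStraddle u v hu hv _ _
    (fun g => hothers ap ha hna (huv ▸ g)) _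
    pvConnFacts.1.1 pvConnFacts.1.2 (fun g => hc1 (huv ▸ g))
    (fun g => hothers bp hb hnb (huv ▸ g)) hin

theorem pvNoIn3 (xp ap bp cp : String × String) (hx : xp ∈ pvRulePairs) (ha : ap ∈ pvRulePairs)
    (hb : bp ∈ pvRulePairs) (hc : cp ∈ pvRulePairs)
    (hna : xp.1 ≠ ap.1) (hnb : xp.1 ≠ bp.1) (hnc : xp.1 ≠ cp.1) :
    PySem.Str.isIn xp.1 (ap.1 ++ " at the intersection of " ++ bp.1 ++ " and " ++ cp.1) = false := by
  obtain ⟨hwK, ⟨hlen, hsp⟩, hothers, _, hc2, hc3⟩ := pvWitFacts xp hx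
  obtain ⟨u, v, huv, hu, hv⟩ := pvWitBigram _ hlen hsp
  apply pvIsIn_false_of_not_infix
  intro h
  have hin := hwK.trans h
  rw [huv, String.toList_append, String.toList_append, String.toList_append,
    String.toList_append, List.append_assoc, List.append_assoc, List.append_assoc] at hin
  refine pvNoStraddle u v hu hv _ _
    (fun g => hothers ap ha hna (huv ▸ g)) _
    pvConnFacts.2.1.1 pvConnFacts.2.1.2 (fun g => hc2 (huv ▸ g)) ?_ hin
  exact pvNoStraddle u v hu hv _ _
    (fun g => hothers bp hb hnb (huv ▸ g)) _
    pvConnFacts.2.2.1 pvConnFacts.2.2.2 (fun g => hc3 (huv ▸ g))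
    (fun g => hothers cp hc hnc (huv ▸ g))

theorem pvFind (pre post : List (String × String)) (a : String × String) (base : String)
    (hsplit : pvRulePairs = pre ++ a :: post)
    (hpos : PySem.Str.isIn a.1 base = true)
    (hneg : ∀ x ∈ pre, PySem.Str.isIn x.1 base = false) :
    pvRulePairs.find? (fun kv => PySem.Str.isIn kv.1 base) = some a := by
  rw [hsplit, List.find?_append,
    List.find?_eq_none.mpr (fun x hx => by simp only [Bool.not_eq_true]; exact hneg x hx)]
  simp only [Option.none_or, List.find?_cons, hpos]

theorem pvSplitNe (pre post : List (String × String)) (a : String × String)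
    (hsplit : pvRulePairs = pre ++ a :: post) :
    ∀ x ∈ pre, ∀ y ∈ a :: post, x.1 ≠ y.1 := by
  have h := pvLabelsNodup
  rw [hsplit, List.map_append] at h
  have hd := (List.nodup_append.mp h).2.2
  intro x hx y hy heq
  have h1 : x.1 ∈ pre.map Prod.fst := List.mem_map_of_mem hx
  have h2 : x.1 ∈ (a :: post).map Prod.fst := heq ▸ List.mem_map_of_mem hy
  exact hd x.1 h1 x.1 h2 rfl

theorem pvConsSublist {α : Type} (a : α) (rest pre post : List α) (ha : a ∉ pre)
    (h : (a :: rest).Sublist (pre ++ a :: post)) : rest.Sublist post := by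
  induction pre with
  | nil =>
    simp only [List.nil_append] at h
    cases h with
    | cons _ h' => exact (List.sublist_cons_self a rest).trans h'
    | cons₂ _ h' => exact h'
  | cons p pre' ih =>
    simp only [List.cons_append] at h
    cases h with
    | cons _ h' => exact ih (fun g => ha (List.mem_cons_of_mem p g)) h'
    | cons₂ _ h' => exact absurd (List.mem_cons_self) ha

theorem pvTail_eq (hits : List (String × String)) (hsub : hits.Sublist pvRulePairs)
    (hne : hits ≠ []) :
    pvTailA (hits.map Prod.fst) =
      pvBaseB (hits.map Prod.fst) ++ " " ++
        pvImplsB.getD (PySem.List.pyGetD (hits.map Prod.fst) 0 "") "" := by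
  match hits, hne with
  | a :: rest, _ =>
  have hamem : a ∈ pvRulePairs := hsub.subset List.mem_cons_self
  obtain ⟨pre, post, hsplit⟩ := List.append_of_mem hamem
  have hprene := pvSplitNe pre post a hsplit
  have hnapre : a ∉ pre := fun hin => (hprene a hin a List.mem_cons_self) rfl
  have hrest : rest.Sublist post := pvConsSublist a rest pre post hnapre (hsplit ▸ hsub)
  have hmem_pre : ∀ x ∈ pre, x ∈ pvRulePairs := fun x hx =>
    hsplit ▸ List.mem_append_left _ hx
  have hmem_post : ∀ x ∈ post, x ∈ pvRulePairs := fun x hx =>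
    hsplit ▸ List.mem_append_right _ (List.mem_cons_of_mem a hx)
  have hget := pvImplsB_getD a hamem
  rcases rest with _ | ⟨b, rest1⟩
  · -- one part
    have hfind := pvFind pre post a a.1 hsplit
      (pvIsIn_true_of_prefix _ _ (List.prefix_refl _))
      (fun x hx => pvNoIn1 x a (hmem_pre x hx) hamem (hprene x hx a List.mem_cons_self))
    unfold pvTailA pvBaseB
    simp only [List.map, List.length, pvGet0, pvImplsA_items, Nat.reduceBEq,
      zero_add, BEq.rfl, if_true, hfind, hget]
  · have hbp : b ∈ post := hrest.subset List.mem_cons_self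
    have hbmem : b ∈ pvRulePairs := hmem_post b hbp
    have hbne : ∀ x ∈ pre, x.1 ≠ b.1 := fun x hx =>
      hprene x hx b (List.mem_cons_of_mem a hbp)
    rcases rest1 with _ | ⟨c, rest2⟩
    · -- two parts
      have hfind := pvFind pre post a (a.1 ++ " intersecting with " ++ b.1) hsplit
        (pvIsIn_true_of_prefix _ _ (by
          rw [String.toList_append, String.toList_append, List.append_assoc]
          exact List.prefix_append _ _))
        (fun x hx => pvNoIn2 x a b (hmem_pre x hx) hamem hbmem
          (hprene x hx a List.mem_cons_self) (hbne x hx))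
      unfold pvTailA pvBaseB
      simp only [List.map, List.length_cons, List.length_nil, Nat.reduceAdd, Nat.reduceBEq,
        zero_add, pvGet0, pvGet1, pvImplsA_items, Bool.false_eq_true, if_false, if_true, hget]
      rw [hfind]
    · -- three or more parts
      have hcp : c ∈ post := hrest.subset (List.mem_cons_of_mem b List.mem_cons_self)
      have hcmem : c ∈ pvRulePairs := hmem_post c hcp
      have hcne : ∀ x ∈ pre, x.1 ≠ c.1 := fun x hx =>
        hprene x hx c (List.mem_cons_of_mem a hcp)
      have hfind := pvFind pre post a
        (a.1 ++ " at the intersection of " ++ b.1 ++ " and " ++ c.1) hsplit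
        (pvIsIn_true_of_prefix _ _ (by
          rw [String.toList_append, String.toList_append, String.toList_append,
            String.toList_append, List.append_assoc, List.append_assoc, List.append_assoc]
          exact List.prefix_append _ _))
        (fun x hx => pvNoIn3 x a b c (hmem_pre x hx) hamem hbmem hcmem
          (hprene x hx a List.mem_cons_self) (hbne x hx) (hcne x hx))
      unfold pvTailA pvBaseB
      have h1 : ((rest2.length + 1 + 1 + 1) == 1) = false := by simp
      have h2 : ((rest2.length + 1 + 1 + 1) == 2) = false := by simp
      simp only [List.map, List.length_cons, List.length_map,
        pvGet0, pvGet1, pvGet2, pvImplsA_items, h1, h2, Bool.false_eq_true, if_false, hget]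
      rw [hfind]

-- filter commutes with the first projection
theorem pvFilterMapFst {α β : Type} (l : List (α × β)) (p : α → Bool) :
    (l.map Prod.fst).filter p = (l.filter (fun kv => p kv.1)).map Prod.fst := by
  induction l with
  | nil => rfl
  | cons a l ih =>
    by_cases h : p a.1 <;> simp [h, ih]

-- ===== VERDICT (by name: the statement is the Claim_ definition above) =====
theorem analyze_significance_spec : Claim_equal_analyze_significance := by
  intro content title _
  unfold Spec_analyze_significance analyze_significance analyze_significance_alt
  simp only [pvParts_eq_labels, pvLabelsB_eq, pvFilterMapFst]
  set hits := pvRulePairs.filter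
    (fun kv => PySem.Set.contains (pvMatchedB (PySem.Str.lower content) (PySem.Str.lower title)) kv.1)
    with hh
  by_cases h : hits = []
  · rw [h]; rfl
  · have hsub : hits.Sublist pvRulePairs := hh ▸ List.filter_sublist
    have ht := pvTail_eq hits hsub h
    have hne : (hits.map Prod.fst).isEmpty = false := by
      simp [h]
    rw [hne]
    simp only [Bool.false_eq_true, if_false, ht]
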